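-- pv_equiv track=rewrite | github.com/izdar/saerm | data-hostapd/it5/runtime_filter.py | filter_by_prefix
-- ===== SOURCE A (Python) =====
-- def is_prefix(list1, list2):
--     """Check if list1 is a prefix of list2"""
--     if len(list1) > len(list2):
--         return False
--
--     return all(list1[i] == list2[i] for i in range(len(list1)))
--
-- def filter_by_prefix(list_of_lists):
--     """Keep only the shortest lists that are prefixes of longer lists,
--     or lists that don't share common prefixes with any other list"""
--     if not list_of_lists:
--         return []
--
--     # Sort by length (shortest first)
--     sorted_lists = sorted(list_of_lists, key=len)
--     result = []
--
--     for current_list in sorted_lists: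
--         # Skip empty lists
--         if not current_list:
--             continue
--
--         # Check if any list already in result is a prefix of current_list
--         prefix_found = False
--         for existing in result:
--             if is_prefix(existing, current_list):
--                 prefix_found = True
--                 break
--
--         if prefix_found:
--             continue
--
--         # Remove any longer lists that current_list is a prefix of
--         result = [lst for lst in result if not is_prefix(current_list, lst)]
--         result.append(current_list)
--
--     return result
-- ===== SOURCE B (Python) =====
-- def filter_by_prefix(list_of_lists):
--     """Keep only the shortest lists that are prefixes of longer lists,
--     or lists that don't share common prefixes with any other list.
--
--     One table-lookup pass: a list survives iff it is non-empty, no proper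
--     non-empty prefix of it occurs anywhere in the input, and it is not an
--     exact duplicate of an already-kept list.  Only prefix lengths that
--     actually occur among the input lists need to be probed."""
--     prefixes = {tuple(l) for l in list_of_lists if l}
--     lengths = {len(l) for l in list_of_lists if l}
--     result = []
--     seen = set()
--     for current in sorted(list_of_lists, key=len):
--         if not current:
--             continue
--         t = tuple(current)
--         if t in seen:
--             continue
--         seen.add(t)
--         if any(t[:k] in prefixes for k in lengths if k < len(t)):
--             continue
--         result.append(current)
--     return result
-- ===== Notes on version B (the rewrite author's own statement) =====
-- stated objective: faster
-- what changed: Replaces A's incremental grow-and-prune of the result (a nested scan over the evolving result list plus a rebuild for each element) with a single length-sorted pass that decides each list by hash-set lookups of its proper prefixes in a table built once from the whole input.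
import Mathlib
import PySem

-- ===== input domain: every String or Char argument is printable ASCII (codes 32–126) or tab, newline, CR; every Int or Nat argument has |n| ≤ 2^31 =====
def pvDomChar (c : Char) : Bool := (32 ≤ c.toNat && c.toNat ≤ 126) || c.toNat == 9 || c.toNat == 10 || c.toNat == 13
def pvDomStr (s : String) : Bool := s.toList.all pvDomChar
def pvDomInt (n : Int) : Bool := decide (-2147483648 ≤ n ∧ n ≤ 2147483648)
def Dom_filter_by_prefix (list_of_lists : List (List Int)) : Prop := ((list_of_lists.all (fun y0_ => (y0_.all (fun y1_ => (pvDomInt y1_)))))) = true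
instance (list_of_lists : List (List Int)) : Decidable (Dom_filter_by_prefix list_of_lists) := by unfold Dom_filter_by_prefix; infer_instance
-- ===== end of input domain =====

-- B replaces A's nested scan over the evolving result (grow-and-prune) with one
-- length-sorted pass deciding each list by set lookups of its proper prefixes in
-- a table built once from the input (objective: faster).

-- ===== PORT A =====
def is_prefix (list1 list2 : List Int) : Bool :=
  if list1.length > list2.length then false
  else (List.range list1.length).all
    -- indices of range(len(list1)) are in range for both lists, where list[i] = getD i 0
    (fun i => PySem.List.pyGetD list1 (i : Int) 0 == PySem.List.pyGetD list2 (i : Int) 0)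

def fbpA_step (result : List (List Int)) (current_list : List Int) : List (List Int) :=
  if current_list = [] then result
  else if result.any (fun existing => is_prefix existing current_list) then result
  else (result.filter (fun lst => !is_prefix current_list lst)) ++ [current_list]

def filter_by_prefix (list_of_lists : List (List Int)) : List (List Int) :=
  if list_of_lists = [] then []
  else (PySem.List.sorted list_of_lists (fun l => (l.length : Int)) false).foldl fbpA_step []

-- ===== PORT B =====
def fbpB_step (prefixes : PySem.Set (List Int)) (lengths : PySem.Set Nat)
    (st : List (List Int) × PySem.Set (List Int)) (current : List Int) :
    List (List Int) × PySem.Set (List Int) :=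
  if current = [] then st
  else if PySem.Set.contains st.2 current then st
  else
    let seen := PySem.Set.add st.2 current
    -- 'any(t[:k] in prefixes for k in lengths if k < len(t))': any over the set is
    -- order-independent, so iterating the Set's list is exact
    if lengths.any (fun k => decide (k < current.length) &&
        PySem.Set.contains prefixes (current.take k)) then (st.1, seen)
    else (st.1 ++ [current], seen)

def filter_by_prefix_alt (list_of_lists : List (List Int)) : List (List Int) :=
  ((PySem.List.sorted list_of_lists (fun l => (l.length : Int)) false).foldl
    (fbpB_step (PySem.Set.ofList (list_of_lists.filter (fun l => !l.isEmpty)))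
      (PySem.Set.ofList ((list_of_lists.filter (fun l => !l.isEmpty)).map List.length)))
    ([], PySem.Set.empty)).1

-- ===== PRECONDITION & SPEC =====
def Spec_filter_by_prefix (list_of_lists : List (List Int)) (out : List (List Int)) : Prop := out = filter_by_prefix_alt list_of_lists
instance (list_of_lists : List (List Int)) (out : List (List Int)) : Decidable (Spec_filter_by_prefix list_of_lists out) := by unfold Spec_filter_by_prefix; infer_instance

-- ===== CLAIM (what is proved, stated in full; the proofs are below) =====
def Claim_equal_filter_by_prefix : Prop := ∀ (list_of_lists : List (List Int)), Dom_filter_by_prefix list_of_lists → Spec_filter_by_prefix list_of_lists (filter_by_prefix list_of_lists)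

-- ===== LEMMAS AND PROOFS =====

theorem contains_iff_mem (s : PySem.Set (List Int)) (x : List Int) :
    PySem.Set.contains s x = true ↔ x ∈ s := by
  simp [PySem.Set.contains]

theorem is_prefix_iff (l1 l2 : List Int) : is_prefix l1 l2 = true ↔ l1 <+: l2 := by
  unfold is_prefix
  split_ifs with h
  · simp only [false_iff]
    intro hp
    exact absurd hp.length_le (by omega)
  · have hle : l1.length ≤ l2.length := by omega
    simp only [List.all_eq_true, List.mem_range, PySem.List.pyGetD_natCast, beq_iff_eq]
    rw [List.prefix_iff_getElem?]
    constructor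
    · intro hall i hi
      have heq := hall i hi
      rw [List.getD_eq_getElem l1 0 hi, List.getD_eq_getElem l2 0 (by omega)] at heq
      rw [List.getElem?_eq_getElem (by omega), heq]
    · intro hp i hi
      have heq := hp i hi
      rw [List.getElem?_eq_getElem (by omega)] at heq
      rw [List.getD_eq_getElem l1 0 hi, List.getD_eq_getElem l2 0 (by omega)]
      exact (Option.some_inj.mp heq).symm

theorem loop_eq (S : PySem.Set (List Int)) (lens : PySem.Set Nat) :
    ∀ (s' p R : List (List Int)) (seen : PySem.Set (List Int)),
    (∀ K ∈ R, K ∈ p ∧ K ≠ []) →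
    (∀ L ∈ p, L ≠ [] → ∃ K ∈ R, K <+: L) →
    (∀ L : List Int, L ∈ seen ↔ (L ∈ p ∧ L ≠ [])) →
    (p ++ s').Pairwise (fun a b => a.length ≤ b.length) →
    (∀ L : List Int, PySem.Set.contains S L = true ↔ (L ∈ p ++ s' ∧ L ≠ [])) →
    (∀ L : List Int, L ∈ p ++ s' → L ≠ [] → L.length ∈ lens) →
    s'.foldl fbpA_step R = (s'.foldl (fbpB_step S lens) (R, seen)).1 := by
  intro s'
  induction s' with
  | nil => intro p R seen _ _ _ _ _ _; rfl
  | cons current s' ih =>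
    intro p R seen hR hcov hseen hpair hS hlens
    by_cases hcur : current = []
    · -- both sides skip an empty list
      subst hcur
      simp only [List.foldl_cons, fbpA_step, fbpB_step]
      apply ih (p ++ [[]]) R seen
      · intro K hK; exact ⟨List.mem_append_left _ (hR K hK).1, (hR K hK).2⟩
      · intro L hL hLne
        rcases List.mem_append.1 hL with h | h
        · exact hcov L h hLne
        · simp at h; exact absurd h hLne
      · intro L; rw [hseen L]
        constructor
        · rintro ⟨h1, h2⟩; exact ⟨List.mem_append_left _ h1, h2⟩
        · rintro ⟨h1, h2⟩
          rcases List.mem_append.1 h1 with h | h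
          · exact ⟨h, h2⟩
          · simp at h; exact absurd h h2
      · simpa [List.append_assoc] using hpair
      · intro L; rw [hS L]; simp [List.append_assoc]
      · intro L hL; apply hlens L; simpa [List.append_assoc] using hL
    · -- non-empty current
      have hpair' := hpair
      rw [List.pairwise_append] at hpair'
      obtain ⟨hpp, hcs, hcross⟩ := hpair'
      rw [List.pairwise_cons] at hcs
      obtain ⟨hlen_s', _⟩ := hcs
      have hlen_p : ∀ K ∈ p, K.length ≤ current.length := fun K hK =>
        hcross K hK current List.mem_cons_self
      -- the two skip-conditions agree
      have hcond : (R.any (fun existing => is_prefix existing current) = true) ↔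
          (current ∈ seen ∨ lens.any (fun k => decide (k < current.length) &&
            PySem.Set.contains S (current.take k)) = true) := by
        constructor
        · intro hA
          rw [List.any_eq_true] at hA
          obtain ⟨K, hKR, hKpre⟩ := hA
          rw [is_prefix_iff] at hKpre
          obtain ⟨hKp, hKne⟩ := hR K hKR
          by_cases hKL : K = current
          · left; rw [hseen]; exact ⟨hKL ▸ hKp, hcur⟩
          · right
            rw [List.any_eq_true]
            have hlt : K.length < current.length := by
              rcases Nat.lt_or_ge K.length current.length with h | h
              · exact h
              · exact absurd (hKpre.eq_of_length_le h) hKL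
            refine ⟨K.length, hlens K (List.mem_append_left _ hKp) hKne, ?_⟩
            rw [Bool.and_eq_true, decide_eq_true_eq]
            have htake : current.take K.length = K :=
              (List.prefix_iff_eq_take.mp hKpre).symm
            rw [htake, hS K]
            exact ⟨hlt, List.mem_append_left _ hKp, hKne⟩
        · intro hB
          rw [List.any_eq_true]
          rcases hB with hB | hB
          · obtain ⟨hcp, _⟩ := (hseen current).1 hB
            obtain ⟨K, hKR, hKpre⟩ := hcov current hcp hcur
            exact ⟨K, hKR, (is_prefix_iff K current).2 hKpre⟩
          · rw [List.any_eq_true] at hB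
            obtain ⟨k, _, hkc⟩ := hB
            rw [Bool.and_eq_true, decide_eq_true_eq] at hkc
            obtain ⟨hklt, hkc⟩ := hkc
            obtain ⟨hPmem, hPne⟩ := (hS (current.take k)).1 hkc
            have hPlen : (current.take k).length = k := by simp [Nat.le_of_lt hklt]
            have hPp : current.take k ∈ p := by
              rcases List.mem_append.1 hPmem with h | h
              · exact h
              · rcases List.mem_cons.1 h with h | h
                · exact absurd (congrArg List.length h) (by rw [hPlen]; omega)
                · have := hlen_s' _ h
                  rw [hPlen] at this; omega
            obtain ⟨K, hKR, hKpre⟩ := hcov _ hPp hPne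
            exact ⟨K, hKR, (is_prefix_iff K current).2
              (hKpre.trans (List.take_prefix k current))⟩
      simp only [List.foldl_cons, fbpA_step, fbpB_step, if_neg hcur]
      by_cases hA : R.any (fun existing => is_prefix existing current) = true
      · rw [if_pos hA]
        have hcovcur : ∃ K ∈ R, K <+: current := by
          rw [List.any_eq_true] at hA
          obtain ⟨K, hKR, hKpre⟩ := hA
          exact ⟨K, hKR, (is_prefix_iff K current).1 hKpre⟩
        by_cases hsc : PySem.Set.contains seen current = true
        · rw [if_pos hsc]
          -- current was already seen: it is in p
          have hcp : current ∈ p := ((hseen current).1 ((contains_iff_mem _ _).1 hsc)).1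
          apply ih (p ++ [current]) R seen
          · intro K hK; exact ⟨List.mem_append_left _ (hR K hK).1, (hR K hK).2⟩
          · intro L hL hLne
            rcases List.mem_append.1 hL with h | h
            · exact hcov L h hLne
            · simp at h; subst h; exact hcovcur
          · intro L; rw [hseen L]
            constructor
            · rintro ⟨h1, h2⟩; exact ⟨List.mem_append_left _ h1, h2⟩
            · rintro ⟨h1, h2⟩
              rcases List.mem_append.1 h1 with h | h
              · exact ⟨h, h2⟩
              · simp at h; subst h; exact ⟨hcp, h2⟩
          · simpa [List.append_assoc] using hpair
          · intro L; rw [hS L]; simp [List.append_assoc]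
          · intro L hL; apply hlens L; simpa [List.append_assoc] using hL
        · rw [if_neg hsc]
          have hpre : lens.any (fun k => decide (k < current.length) &&
              PySem.Set.contains S (current.take k)) = true := by
            rcases hcond.1 hA with h | h
            · exact absurd ((contains_iff_mem _ _).2 h) hsc
            · exact h
          rw [if_pos hpre]
          apply ih (p ++ [current]) R (PySem.Set.add seen current)
          · intro K hK; exact ⟨List.mem_append_left _ (hR K hK).1, (hR K hK).2⟩
          · intro L hL hLne
            rcases List.mem_append.1 hL with h | h
            · exact hcov L h hLne
            · simp at h; subst h; exact hcovcur
          · intro L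
            rw [PySem.Set.mem_add, hseen L]
            constructor
            · rintro (⟨h1, h2⟩ | h)
              · exact ⟨List.mem_append_left _ h1, h2⟩
              · subst h; exact ⟨List.mem_append_right _ (by simp), hcur⟩
            · rintro ⟨h1, h2⟩
              rcases List.mem_append.1 h1 with h | h
              · exact Or.inl ⟨h, h2⟩
              · simp at h; exact Or.inr h
          · simpa [List.append_assoc] using hpair
          · intro L; rw [hS L]; simp [List.append_assoc]
          · intro L hL; apply hlens L; simpa [List.append_assoc] using hL
      · rw [if_neg hA]
        have hsc : ¬ PySem.Set.contains seen current = true := by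
          intro hsc
          exact hA (hcond.2 (Or.inl ((contains_iff_mem _ _).1 hsc)))
        rw [if_neg hsc]
        have hpre : ¬ lens.any (fun k => decide (k < current.length) &&
            PySem.Set.contains S (current.take k)) = true := by
          intro hpre
          exact hA (hcond.2 (Or.inr hpre))
        rw [if_neg hpre]
        -- the prune step of A removes nothing: everything kept so far is no longer than current
        have hfilt : R.filter (fun lst => !is_prefix current lst) = R := by
          rw [List.filter_eq_self]
          intro K hK
          simp only [Bool.not_eq_eq_eq_not, Bool.not_true, ← Bool.not_eq_true]
          intro hKpre
          rw [is_prefix_iff] at hKpre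
          have hKlen : K.length ≤ current.length := hlen_p K (hR K hK).1
          have hKeq : current = K := hKpre.eq_of_length_le hKlen
          apply hA
          rw [List.any_eq_true]
          exact ⟨K, hK, (is_prefix_iff K current).2 (hKeq ▸ List.prefix_refl K)⟩
        rw [hfilt]
        apply ih (p ++ [current]) (R ++ [current]) (PySem.Set.add seen current)
        · intro K hK
          rcases List.mem_append.1 hK with h | h
          · exact ⟨List.mem_append_left _ (hR K h).1, (hR K h).2⟩
          · simp at h; subst h; exact ⟨List.mem_append_right _ (by simp), hcur⟩
        · intro L hL hLne
          rcases List.mem_append.1 hL with h | h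
          · obtain ⟨K, hKR, hKpre⟩ := hcov L h hLne
            exact ⟨K, List.mem_append_left _ hKR, hKpre⟩
          · simp at h; subst h
            exact ⟨L, List.mem_append_right _ (by simp), List.prefix_refl L⟩
        · intro L
          rw [PySem.Set.mem_add, hseen L]
          constructor
          · rintro (⟨h1, h2⟩ | h)
            · exact ⟨List.mem_append_left _ h1, h2⟩
            · subst h; exact ⟨List.mem_append_right _ (by simp), hcur⟩
          · rintro ⟨h1, h2⟩
            rcases List.mem_append.1 h1 with h | h
            · exact Or.inl ⟨h, h2⟩
            · simp at h; exact Or.inr h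
        · simpa [List.append_assoc] using hpair
        · intro L; rw [hS L]; simp [List.append_assoc]
        · intro L hL; apply hlens L; simpa [List.append_assoc] using hL

-- ===== VERDICT (by name: the statement is the Claim_ definition above) =====
theorem filter_by_prefix_spec : Claim_equal_filter_by_prefix := by
  intro xs _
  unfold Spec_filter_by_prefix filter_by_prefix filter_by_prefix_alt
  by_cases hxs : xs = []
  · subst hxs; rfl
  · rw [if_neg hxs]
    apply loop_eq _ _ _ [] [] PySem.Set.empty
    · intro K hK; simp at hK
    · intro L hL; simp at hL
    · intro L; simp [PySem.Set.empty]
    · simp only [List.nil_append]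
      exact (PySem.List.sorted_pairwise xs (fun l => (l.length : Int))).imp
        (by intro a b h; exact_mod_cast h)
    · intro L
      rw [contains_iff_mem, PySem.Set.mem_ofList]
      simp [List.mem_filter, PySem.List.mem_sorted]
    · intro L hL hLne
      rw [PySem.Set.mem_ofList]
      simp only [List.nil_append, PySem.List.mem_sorted] at hL
      exact List.mem_map_of_mem (by rw [List.mem_filter]; simpa [hLne] using hL)
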